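-- pv_equiv track=rewrite | github.com/TrazaCoplaca/prg_coplaca | agentes_ia2/src/agente_sql/api/routes/export.py | filter_columns_for_pdf
-- ===== SOURCE A (Python) =====
-- from typing import List, Dict, Any, Set
--
-- PDF_EXCLUDED_COLUMNS: Set[str] = {
--     # IDs internos
--     'IdTrazaCaja', 'IdCaja', 'IdAlbaran', 'IdSocio', 'IdVariedad',
--     'IdCategoria', 'IdCalidad', 'IdProducto', 'Id',
--
--     # Campos técnicos
--     'Traspasado', 'FechaModificacion', 'UsuarioModificacion',
--     'FechaCreacion', 'UsuarioCreacion', 'Activo', 'Eliminado',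
--     'Version', 'Sincronizado', 'Hash', 'Timestamp', 'RowVersion',
--
--     # Otros campos no relevantes para trazabilidad
--     'Interno', 'Sistema', 'Migrado', 'IdExterno'
-- }
--
-- PDF_PRIORITY_COLUMNS = [
--     'CodigoCaja', 'NumeroCaja', 'Caja',
--     'NumeroAlbaran', 'CodigoAlbaran', 'Albaran',
--     'CodigoSocio', 'NombreSocio', 'Socio',
--     'FechaAlbaran', 'Fecha',
--     'Variedad', 'TipoProducto', 'Producto',
--     'Peso', 'Kilos', 'PesoBruto', 'PesoNeto',
--     'Calidad', 'Categoria', 'Clasificacion',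
--     'Estado', 'EstadoCaja',
--     'Lote', 'NumeroLote',
--     'Origen', 'Procedencia',
--     'Destino',
--     'Observaciones', 'Notas'
-- ]
--
-- def filter_columns_for_pdf(columns: List[str], max_columns: int = 8) -> List[str]:
--     """
--     Filtra y ordena las columnas para el PDF según prioridad.
--
--     Args:
--         columns: Lista de todas las columnas disponibles
--         max_columns: Número máximo de columnas a incluir en PDF
--
--     Returns:
--         Lista filtrada y ordenada de columnas
--     """
--     # Excluir columnas no deseadas
--     filtered = [col for col in columns if col not in PDF_EXCLUDED_COLUMNS]
--
--     # Ordenar según prioridad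
--     priority_filtered = []
--     remaining = []
--
--     for col in filtered:
--         if col in PDF_PRIORITY_COLUMNS:
--             priority_filtered.append((PDF_PRIORITY_COLUMNS.index(col), col))
--         else:
--             remaining.append(col)
--
--     # Ordenar por prioridad
--     priority_filtered.sort(key=lambda x: x[0])
--     priority_columns = [col for _, col in priority_filtered]
--
--     # Combinar: primero las prioritarias, luego las restantes
--     final_columns = priority_columns + remaining
--
--     # Limitar al número máximo
--     return final_columns[:max_columns]
-- ===== SOURCE B (Python) =====
-- PDF_EXCLUDED_COLUMNS = {
--     'IdTrazaCaja', 'IdCaja', 'IdAlbaran', 'IdSocio', 'IdVariedad',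
--     'IdCategoria', 'IdCalidad', 'IdProducto', 'Id',
--     'Traspasado', 'FechaModificacion', 'UsuarioModificacion',
--     'FechaCreacion', 'UsuarioCreacion', 'Activo', 'Eliminado',
--     'Version', 'Sincronizado', 'Hash', 'Timestamp', 'RowVersion',
--     'Interno', 'Sistema', 'Migrado', 'IdExterno'
-- }
--
-- PDF_PRIORITY_COLUMNS = [
--     'CodigoCaja', 'NumeroCaja', 'Caja',
--     'NumeroAlbaran', 'CodigoAlbaran', 'Albaran',
--     'CodigoSocio', 'NombreSocio', 'Socio',
--     'FechaAlbaran', 'Fecha',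
--     'Variedad', 'TipoProducto', 'Producto',
--     'Peso', 'Kilos', 'PesoBruto', 'PesoNeto',
--     'Calidad', 'Categoria', 'Clasificacion',
--     'Estado', 'EstadoCaja',
--     'Lote', 'NumeroLote',
--     'Origen', 'Procedencia',
--     'Destino',
--     'Observaciones', 'Notas'
-- ]
--
-- def filter_columns_for_pdf(columns, max_columns=8):
--     # Gather-by-priority: walk the priority table once, collecting every kept
--     # occurrence of each priority name in original order; no sort, no .index().
--     kept = [c for c in columns if c not in PDF_EXCLUDED_COLUMNS]
--     priority = [c for p in PDF_PRIORITY_COLUMNS for c in kept if c == p]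
--     rest = [c for c in kept if c not in PDF_PRIORITY_COLUMNS]
--     return (priority + rest)[:max_columns]
-- ===== Notes on version B (the rewrite author's own statement) =====
-- stated objective: simpler
-- what changed: Replaces A's partition-into-(index,name)-pairs + explicit sort + strip-indices + concatenate pipeline by a sort-free gather: one pass over the priority table collecting kept occurrences of each priority name (order comes from the table itself), plus a filter for the rest.
import Mathlib
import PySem

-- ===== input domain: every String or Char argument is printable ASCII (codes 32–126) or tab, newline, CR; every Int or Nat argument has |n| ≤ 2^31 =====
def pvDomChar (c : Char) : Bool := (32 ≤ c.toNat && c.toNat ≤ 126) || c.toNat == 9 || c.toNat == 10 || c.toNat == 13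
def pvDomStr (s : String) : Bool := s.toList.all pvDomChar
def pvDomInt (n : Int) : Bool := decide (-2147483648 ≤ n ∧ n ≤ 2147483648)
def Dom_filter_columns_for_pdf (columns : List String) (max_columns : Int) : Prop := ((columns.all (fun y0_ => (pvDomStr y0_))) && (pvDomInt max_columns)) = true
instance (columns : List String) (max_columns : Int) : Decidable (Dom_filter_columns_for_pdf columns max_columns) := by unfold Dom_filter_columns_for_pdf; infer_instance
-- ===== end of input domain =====

-- B replaces A's partition + index-keyed sort + strip + concatenate by a sort-free
-- gather over the priority table (simpler decomposition, same return value).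


-- ===== PORT A =====
def pdfExcludedColumns : List String :=
  ["IdTrazaCaja", "IdCaja", "IdAlbaran", "IdSocio", "IdVariedad",
   "IdCategoria", "IdCalidad", "IdProducto", "Id",
   "Traspasado", "FechaModificacion", "UsuarioModificacion",
   "FechaCreacion", "UsuarioCreacion", "Activo", "Eliminado",
   "Version", "Sincronizado", "Hash", "Timestamp", "RowVersion",
   "Interno", "Sistema", "Migrado", "IdExterno"]

def pdfPriorityColumns : List String :=
  ["CodigoCaja", "NumeroCaja", "Caja",
   "NumeroAlbaran", "CodigoAlbaran", "Albaran",
   "CodigoSocio", "NombreSocio", "Socio",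
   "FechaAlbaran", "Fecha",
   "Variedad", "TipoProducto", "Producto",
   "Peso", "Kilos", "PesoBruto", "PesoNeto",
   "Calidad", "Categoria", "Clasificacion",
   "Estado", "EstadoCaja",
   "Lote", "NumeroLote",
   "Origen", "Procedencia",
   "Destino",
   "Observaciones", "Notas"]

-- PDF_PRIORITY_COLUMNS.index(col); the loop only calls it when col is a member,
-- so the getD default is never read.
def pdfPriorityIndex (col : String) : Nat :=
  (PySem.List.index? pdfPriorityColumns col).getD 0

def filter_columns_for_pdf (columns : List String) (max_columns : Int) : List String :=
  let filtered := columns.filter (fun col => !(pdfExcludedColumns.contains col))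
  let st := filtered.foldl
    (fun (acc : List (Nat × String) × List String) col =>
      if pdfPriorityColumns.contains col then
        (acc.1 ++ [(pdfPriorityIndex col, col)], acc.2)
      else
        (acc.1, acc.2 ++ [col]))
    ([], [])
  let priority_filtered := PySem.List.sorted st.1 (fun x => x.1) false
  let priority_columns := priority_filtered.map (fun x => x.2)
  let final_columns := priority_columns ++ st.2
  PySem.List.slice final_columns none (some max_columns)

-- ===== PORT B =====
def filter_columns_for_pdf_alt (columns : List String) (max_columns : Int) : List String :=
  let kept := columns.filter (fun c => !(pdfExcludedColumns.contains c))
  let priority := pdfPriorityColumns.flatMap (fun p => kept.filter (fun c => c == p))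
  let rest := kept.filter (fun c => !(pdfPriorityColumns.contains c))
  PySem.List.slice (priority ++ rest) none (some max_columns)

-- ===== PRECONDITION & SPEC =====
def Spec_filter_columns_for_pdf (columns : List String) (max_columns : Int) (out : List String) : Prop := out = filter_columns_for_pdf_alt columns max_columns
instance (columns : List String) (max_columns : Int) (out : List String) : Decidable (Spec_filter_columns_for_pdf columns max_columns out) := by unfold Spec_filter_columns_for_pdf; infer_instance

-- ===== CLAIM (what is proved, stated in full; the proofs are below) =====
def Claim_equal_filter_columns_for_pdf : Prop := ∀ (columns : List String) (max_columns : Int), Dom_filter_columns_for_pdf columns max_columns → Spec_filter_columns_for_pdf columns max_columns (filter_columns_for_pdf columns max_columns)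

-- ===== LEMMAS AND PROOFS =====

-- shorthand used only in proofs
def pvTag (c : String) : Nat × String := (pdfPriorityIndex c, c)

-- A's partition loop, characterised: the pair side collects the priority members
-- (tagged with their index), the other side the rest, both in original order.
theorem pv_loop_char (l : List String) (p : List (Nat × String)) (r : List String) :
    l.foldl
      (fun (acc : List (Nat × String) × List String) col =>
        if pdfPriorityColumns.contains col then
          (acc.1 ++ [(pdfPriorityIndex col, col)], acc.2)
        else
          (acc.1, acc.2 ++ [col])) (p, r)
    = (p ++ (l.filter (fun c => pdfPriorityColumns.contains c)).map pvTag,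
       r ++ l.filter (fun c => !(pdfPriorityColumns.contains c))) := by
  induction l generalizing p r with
  | nil => simp
  | cons a t ih =>
    simp only [List.foldl_cons]
    by_cases h : pdfPriorityColumns.contains a = true
    · rw [if_pos h, ih, List.filter_cons, List.filter_cons, if_pos h,
        if_neg (by simp_all)]
      simp [pvTag]
    · rw [if_neg h, ih, List.filter_cons, List.filter_cons, if_neg h,
        if_pos (by simp_all)]
      simp

-- equal priority indices of two priority members force equal names
theorem pv_index_inj {c d : String} (hc : c ∈ pdfPriorityColumns)
    (hd : d ∈ pdfPriorityColumns) (h : pdfPriorityIndex c = pdfPriorityIndex d) :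
    c = d := by
  obtain ⟨i, hi⟩ := Option.isSome_iff_exists.mp
    ((PySem.List.index?_isSome_iff (xs := pdfPriorityColumns) (v := c)).mpr hc)
  obtain ⟨j, hj⟩ := Option.isSome_iff_exists.mp
    ((PySem.List.index?_isSome_iff (xs := pdfPriorityColumns) (v := d)).mpr hd)
  obtain ⟨hik, hic, -⟩ := PySem.List.getElem_of_index?_eq_some hi
  obtain ⟨hjk, hjc, -⟩ := PySem.List.getElem_of_index?_eq_some hj
  have hij : i = j := by
    have h' := h
    unfold pdfPriorityIndex at h'
    rw [hi, hj] at h'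
    simpa using h'
  subst hij
  rw [← hic, ← hjc]

-- a ≤-on-keys rearrangement is unique when elements sharing a key are equal —
-- the "a stable sort has only one possible output" fact this file needs
theorem pv_eq_of_perm_of_pairwise (l₁ l₂ : List (Nat × String))
    (hp : l₁.Perm l₂)
    (h1 : l₁.Pairwise (fun a b => a.1 ≤ b.1))
    (h2 : l₂.Pairwise (fun a b => a.1 ≤ b.1))
    (hk : ∀ a ∈ l₁, ∀ b ∈ l₁, a.1 = b.1 → a = b) : l₁ = l₂ := by
  induction l₁ generalizing l₂ with
  | nil => exact (List.Perm.nil_eq hp).symm ▸ rfl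
  | cons a t ih =>
    cases l₂ with
    | nil => exact absurd hp.symm (by simp)
    | cons b t₂ =>
      have hab : a = b := by
        have hbmem : b = a ∨ b ∈ t := List.mem_cons.mp (hp.mem_iff.mpr (by simp))
        have hamem : a = b ∨ a ∈ t₂ := List.mem_cons.mp (hp.mem_iff.mp (by simp))
        have hle₁ : a.1 ≤ b.1 := by
          rcases hbmem with h | h
          · simp [h]
          · exact (List.pairwise_cons.mp h1).1 b h
        have hle₂ : b.1 ≤ a.1 := by
          rcases hamem with h | h
          · simp [h]
          · exact (List.pairwise_cons.mp h2).1 a h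
        exact hk a (by simp) b
          (by rcases hbmem with h | h
              · simp [h]
              · exact List.mem_cons_of_mem _ h)
          (le_antisymm hle₁ hle₂)
      subst hab
      have hpt : t.Perm t₂ := hp.cons_inv
      have := ih t₂ hpt (List.pairwise_cons.mp h1).2 (List.pairwise_cons.mp h2).2
        (fun x hx y hy hxy => hk x (by simp [hx]) y (by simp [hy]) hxy)
      rw [this]

theorem pv_nodup : pdfPriorityColumns.Nodup := by decide

theorem pv_pairwise_idx :
    pdfPriorityColumns.Pairwise (fun p q => pdfPriorityIndex p ≤ pdfPriorityIndex q) := by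
  decide

-- counting through a Boolean filter
theorem pv_count_filter (l : List String) (q : String → Bool) (a : String) :
    List.count a (l.filter q) = if q a then List.count a l else 0 := by
  induction l with
  | nil => simp
  | cons x t ih =>
    by_cases hax : a = x
    · subst hax
      by_cases hq : q a = true <;>
        simp [hq, ih]
    · by_cases hq : q x = true <;>
        simp [hq, ih, Ne.symm hax]

theorem pv_count_flat (a : String) (l : List String) :
    ∀ P : List String, P.Nodup →
      List.count a (P.flatMap (fun p => l.filter (fun c => c == p)))
        = if a ∈ P then List.count a l else 0 := by
  intro P
  induction P with
  | nil => simp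
  | cons p Q ih =>
    intro hP
    have hQ := List.nodup_cons.mp hP
    simp only [List.flatMap_cons, List.count_append]
    rw [ih hQ.2, pv_count_filter]
    by_cases hap : a = p
    · subst hap
      simp [hQ.1]
    · simp [hap]

-- the kept priority members are a rearrangement of B's gathered blocks
theorem pv_perm (l : List String) :
    (l.filter (fun c => pdfPriorityColumns.contains c)).Perm
      (pdfPriorityColumns.flatMap (fun p => l.filter (fun c => c == p))) := by
  rw [List.perm_iff_count]
  intro a
  rw [pv_count_flat a l pdfPriorityColumns pv_nodup, pv_count_filter]
  by_cases h : a ∈ pdfPriorityColumns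
  · simp [h]
  · simp [h]

-- B's gathered priority block, as tagged pairs, is exactly A's stable sort output
theorem pv_gather_pairs (l : List String) :
    PySem.List.sorted
      ((l.filter (fun c => pdfPriorityColumns.contains c)).map pvTag)
      (fun x => x.1) false
    = (pdfPriorityColumns.flatMap (fun p => l.filter (fun c => c == p))).map pvTag := by
  apply pv_eq_of_perm_of_pairwise
  · exact (PySem.List.sorted_perm _ _ _).trans ((pv_perm l).map pvTag)
  · exact PySem.List.sorted_pairwise _ _
  · rw [List.pairwise_map]
    rw [List.pairwise_flatMap]
    constructor
    · intro p hp
      apply List.pairwise_of_forall_mem_list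
      intro c hc d hd
      have hc' : c = p := by simpa using (List.mem_filter.mp hc).2
      have hd' : d = p := by simpa using (List.mem_filter.mp hd).2
      rw [hc', hd']
    · refine pv_pairwise_idx.imp ?_
      intro p q hpq x hx y hy
      have hx' : x = p := by simpa using (List.mem_filter.mp hx).2
      have hy' : y = q := by simpa using (List.mem_filter.mp hy).2
      rw [hx', hy']
      exact hpq
  · intro a ha b hb hab
    rw [PySem.List.mem_sorted] at ha hb
    obtain ⟨c, hc, rfl⟩ := List.mem_map.mp ha
    obtain ⟨d, hd, rfl⟩ := List.mem_map.mp hb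
    have hcP : c ∈ pdfPriorityColumns := by
      simpa using (List.mem_filter.mp hc).2
    have hdP : d ∈ pdfPriorityColumns := by
      simpa using (List.mem_filter.mp hd).2
    have : c = d := pv_index_inj hcP hdP hab
    rw [this]

theorem pv_gather (l : List String) :
    (PySem.List.sorted
      ((l.filter (fun c => pdfPriorityColumns.contains c)).map pvTag)
      (fun x => x.1) false).map (fun x => x.2)
    = pdfPriorityColumns.flatMap (fun p => l.filter (fun c => c == p)) := by
  rw [pv_gather_pairs]
  simp [Function.comp_def, pvTag]

-- ===== VERDICT (by name: the statement is the Claim_ definition above) =====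
theorem filter_columns_for_pdf_spec : Claim_equal_filter_columns_for_pdf := by
  intro columns max_columns _
  show filter_columns_for_pdf columns max_columns = _
  simp only [filter_columns_for_pdf, filter_columns_for_pdf_alt]
  rw [pv_loop_char]
  simp only [List.nil_append]
  rw [pv_gather]
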